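-- pv_equiv track=rewrite | github.com/MarinProdan/school | funkce a while.py | cnt_sum
-- ===== SOURCE A (Python) =====
-- def cnt_sum(start,count):
--     if start % 2 ==0:
--         start+=1
--     sum=0
--     n= start
--     while n <start +(count * 2):
--         sum+= n
--         n+=2
--     return sum
-- ===== SOURCE B (Python) =====
-- def cnt_sum(start, count):
--     s = start + 1 if start % 2 == 0 else start
--     c = max(count, 0)
--     return c * s + c * (c - 1)
-- ===== Notes on version B (the rewrite author's own statement) =====
-- stated objective: faster
-- what changed: Replaced the step-by-2 while loop summing successive odd numbers with the closed-form arithmetic-series formula c*s + c*(c-1) with count clamped at 0.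
import Mathlib
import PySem

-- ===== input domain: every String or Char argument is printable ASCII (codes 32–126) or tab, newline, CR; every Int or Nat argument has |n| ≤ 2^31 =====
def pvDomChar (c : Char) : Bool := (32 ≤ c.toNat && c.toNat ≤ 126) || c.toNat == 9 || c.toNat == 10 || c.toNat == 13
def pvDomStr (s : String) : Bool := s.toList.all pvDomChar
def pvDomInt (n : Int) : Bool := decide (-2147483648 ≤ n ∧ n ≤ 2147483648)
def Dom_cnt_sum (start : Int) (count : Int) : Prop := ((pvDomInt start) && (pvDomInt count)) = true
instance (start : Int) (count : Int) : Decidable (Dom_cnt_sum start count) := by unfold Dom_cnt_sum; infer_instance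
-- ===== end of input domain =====

-- B replaces A's step-by-2 summation loop with the closed-form arithmetic-series formula (O(1) vs O(count)).

-- ===== PORT A =====
-- the while loop: while n < bound: sum += n; n += 2
def cnt_sumLoop (bound : Int) (n : Int) (sum : Int) : Int :=
  if n < bound then cnt_sumLoop bound (n + 2) (sum + n) else sum
termination_by (bound - n).toNat
decreasing_by omega

def cnt_sum (start : Int) (count : Int) : Int :=
  let start := if PySem.Int.mod start 2 = 0 then start + 1 else start
  cnt_sumLoop (start + count * 2) start 0

-- ===== PORT B =====
def cnt_sum_alt (start : Int) (count : Int) : Int :=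
  let s := if PySem.Int.mod start 2 = 0 then start + 1 else start
  let c := max count 0
  c * s + c * (c - 1)

-- ===== PRECONDITION & SPEC =====
def Spec_cnt_sum (start : Int) (count : Int) (out : Int) : Prop := out = cnt_sum_alt start count
instance (start : Int) (count : Int) (out : Int) : Decidable (Spec_cnt_sum start count out) := by unfold Spec_cnt_sum; infer_instance

-- ===== CLAIM (what is proved, stated in full; the proofs are below) =====
def Claim_equal_cnt_sum : Prop := ∀ (start : Int) (count : Int), Dom_cnt_sum start count → Spec_cnt_sum start count (cnt_sum start count)

-- ===== LEMMAS AND PROOFS =====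
theorem cnt_sumLoop_closed (k : Nat) : ∀ (n sum : Int),
    cnt_sumLoop (n + 2 * k) n sum = sum + k * n + k * (k - 1) := by
  induction k with
  | zero =>
    intro n sum
    rw [cnt_sumLoop]
    simp
  | succ k ih =>
    intro n sum
    rw [cnt_sumLoop]
    have h : n < n + 2 * ((k : Int) + 1) := by omega
    push_cast
    rw [if_pos h]
    have : n + 2 * ((k : Int) + 1) = (n + 2) + 2 * (k : Int) := by ring
    rw [this]
    have := ih (n + 2) (sum + n)
    push_cast at this
    rw [this]
    ring

theorem cnt_sumLoop_stop (bound n sum : Int) (h : ¬ n < bound) :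
    cnt_sumLoop bound n sum = sum := by
  rw [cnt_sumLoop, if_neg h]

-- ===== VERDICT (by name: the statement is the Claim_ definition above) =====
theorem cnt_sum_spec : Claim_equal_cnt_sum := by
  intro start count _
  unfold Spec_cnt_sum cnt_sum cnt_sum_alt
  set s := if PySem.Int.mod start 2 = 0 then start + 1 else start with hs
  show cnt_sumLoop (s + count * 2) s 0 = max count 0 * s + max count 0 * (max count 0 - 1)
  by_cases hc : count ≤ 0
  · rw [cnt_sumLoop_stop _ _ _ (by omega)]
    have : max count 0 = 0 := by omega
    rw [this]; ring
  · have hk : s + count * 2 = s + 2 * (count.toNat : Int) := by omega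
    rw [hk, cnt_sumLoop_closed]
    have h1 : (count.toNat : Int) = count := by omega
    have h2 : max count 0 = count := by omega
    rw [h1, h2]; ring
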